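-- pv_equiv track=rewrite | github.com/Axirr/Coding-Challenges | leetCode/python/satisfiabilityEquations/satisfiabilityEquations.py | isConditionsValid
-- ===== SOURCE A (Python) =====
-- def isConditionsValid(equalitySets, inequalityPairs, existingVariables):
--     if (len(inequalityPairs) == 0):     return True
--     for pair in inequalityPairs:
--         letter1 = pair[0]
--         letter2 = pair[1]
--         if (letter1 in existingVariables and letter2 in existingVariables):
--             eqSet1 = []
--             eqSet2 = []
--             for eqSet in equalitySets:
--                 if letter1 in eqSet:
--                     eqSet1 = eqSet
--                     break
--             for eqSet in equalitySets:
--                 if letter2 in eqSet: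
--                     eqSet2 = eqSet
--                     break
--             # eqSet1 = [eqSet for eqSet in equalitySets if letter1 in eqSet][0]
--             # eqSet2 = [eqSet for eqSet in equalitySets if letter2 in eqSet][0]
--             if (eqSet1 == eqSet2):
--                 return False
--
--     return True
-- ===== SOURCE B (Python) =====
-- def isConditionsValid(equalitySets, inequalityPairs, existingVariables):
--     # Precompute: each letter -> index of the first equality set containing it.
--     setIndex = {}
--     for i, eqSet in enumerate(equalitySets):
--         for letter in eqSet:
--             if letter not in setIndex:
--                 setIndex[letter] = i
--     existing = set(existingVariables)
--     for pair in inequalityPairs: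
--         a, b = pair[0], pair[1]
--         if a in existing and b in existing and setIndex.get(a, -1) == setIndex.get(b, -1):
--             return False
--     return True
-- ===== Notes on version B (the rewrite author's own statement) =====
-- stated objective: faster
-- what changed: B builds a letter-to-first-set-index dictionary and a set of existing variables once, then checks each inequality pair by comparing two O(1) index lookups, instead of A's per-pair linear scans over existingVariables and over all equality sets.
-- outside the precondition, e.g. on isConditionsValid([['a', 'b']], ['ab', 'x'], ['a', 'b']): A returns False, B returns False
import Mathlib
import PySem

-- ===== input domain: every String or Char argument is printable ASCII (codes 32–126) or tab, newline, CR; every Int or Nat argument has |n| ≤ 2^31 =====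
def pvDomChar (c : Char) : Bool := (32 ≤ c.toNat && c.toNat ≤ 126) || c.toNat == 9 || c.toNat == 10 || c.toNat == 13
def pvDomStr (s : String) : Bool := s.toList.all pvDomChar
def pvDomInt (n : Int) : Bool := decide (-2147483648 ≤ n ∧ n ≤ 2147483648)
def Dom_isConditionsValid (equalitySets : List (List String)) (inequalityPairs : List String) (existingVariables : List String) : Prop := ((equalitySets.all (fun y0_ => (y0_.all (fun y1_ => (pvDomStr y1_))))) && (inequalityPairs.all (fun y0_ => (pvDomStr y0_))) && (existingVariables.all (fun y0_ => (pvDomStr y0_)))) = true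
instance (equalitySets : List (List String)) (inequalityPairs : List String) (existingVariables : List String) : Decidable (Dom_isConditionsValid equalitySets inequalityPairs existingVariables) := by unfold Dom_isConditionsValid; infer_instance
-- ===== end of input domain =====

-- B replaces A's per-pair linear scans by a precomputed letter→first-set-index dictionary and a
-- set of existing variables, comparing indices per pair (objective: faster, asymptotic).


-- ===== PORT A =====
-- first loop 'for eqSet in equalitySets: if letter in eqSet: eqSet1 = eqSet; break' (starting from [])
def pvFindSetA (c : String) : List (List String) → List String
  | [] => []
  | s :: rest => if s.contains c then s else pvFindSetA c rest

-- the 'for pair in inequalityPairs' loop; pair[0]/pair[1] via pyGet? (none = IndexError, excluded by Pre_)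
def pvLoopA (equalitySets : List (List String)) (existingVariables : List String) : List String → Bool
  | [] => true
  | pair :: rest =>
    match PySem.Str.pyGet? pair 0, PySem.Str.pyGet? pair 1 with
    | some l1, some l2 =>
      let letter1 := String.ofList [l1]
      let letter2 := String.ofList [l2]
      if existingVariables.contains letter1 && existingVariables.contains letter2 then
        if pvFindSetA letter1 equalitySets == pvFindSetA letter2 equalitySets then false
        else pvLoopA equalitySets existingVariables rest
      else pvLoopA equalitySets existingVariables rest
    | _, _ => false  -- IndexError: outside Pre_

def isConditionsValid (equalitySets : List (List String)) (inequalityPairs : List String) (existingVariables : List String) : Bool :=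
  if inequalityPairs.length == 0 then true
  else pvLoopA equalitySets existingVariables inequalityPairs

-- ===== PORT B =====
-- 'for i, eqSet in enumerate(equalitySets): for letter in eqSet: if letter not in setIndex: setIndex[letter] = i'
def pvBuildIdx (equalitySets : List (List String)) : PySem.Dict String Int :=
  (PySem.List.enumerate equalitySets).foldl
    (fun d p => p.2.foldl (fun d w => if d.contains w then d else d.insert w p.1) d)
    PySem.Dict.empty

-- 'for pair in inequalityPairs: …'
def pvLoopB (idx : PySem.Dict String Int) (existing : PySem.Set String) : List String → Bool
  | [] => true
  | pair :: rest =>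
    match PySem.Str.pyGet? pair 0, PySem.Str.pyGet? pair 1 with
    | some a, some b =>
      let sa := String.ofList [a]
      let sb := String.ofList [b]
      if existing.contains sa && existing.contains sb && (idx.getD sa (-1) == idx.getD sb (-1))
      then false
      else pvLoopB idx existing rest
    | _, _ => false  -- IndexError: outside Pre_

def isConditionsValid_alt (equalitySets : List (List String)) (inequalityPairs : List String) (existingVariables : List String) : Bool :=
  pvLoopB (pvBuildIdx equalitySets) (PySem.Set.ofList existingVariables) inequalityPairs

-- ===== PRECONDITION & SPEC =====
-- Pre_ excludes inputs where some inequality-pair string has fewer than 2 characters: there pair[0]/pair[1]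
-- raises IndexError in both programs unless the loop already returned False at an earlier pair (both do).
def Pre_isConditionsValid (equalitySets : List (List String)) (inequalityPairs : List String) (existingVariables : List String) : Prop :=
  ∀ p ∈ inequalityPairs, 2 ≤ PySem.Str.len p
instance (equalitySets : List (List String)) (inequalityPairs : List String) (existingVariables : List String) : Decidable (Pre_isConditionsValid equalitySets inequalityPairs existingVariables) := by unfold Pre_isConditionsValid; infer_instance

def pvWitness_isConditionsValid : List (List String) × List String × List String :=
  ([["a", "b"], ["c"]], ["ac", "ab"], ["a", "b", "c"])

def Spec_isConditionsValid (equalitySets : List (List String)) (inequalityPairs : List String) (existingVariables : List String) (out : Bool) : Prop := out = isConditionsValid_alt equalitySets inequalityPairs existingVariables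
instance (equalitySets : List (List String)) (inequalityPairs : List String) (existingVariables : List String) (out : Bool) : Decidable (Spec_isConditionsValid equalitySets inequalityPairs existingVariables out) := by unfold Spec_isConditionsValid; infer_instance

-- ===== CLAIM (what is proved, stated in full; the proofs are below) =====
def Claim_equal_isConditionsValid : Prop := ∀ (equalitySets : List (List String)) (inequalityPairs : List String) (existingVariables : List String), Dom_isConditionsValid equalitySets inequalityPairs existingVariables → Pre_isConditionsValid equalitySets inequalityPairs existingVariables → Spec_isConditionsValid equalitySets inequalityPairs existingVariables (isConditionsValid equalitySets inequalityPairs existingVariables)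

-- ===== LEMMAS AND PROOFS =====

-- recursive "index of the first set containing c, else -1" (the value B's dictionary stores)
def pvIdxR (c : String) : List (List String) → Int
  | [] => -1
  | s :: rest => if s.contains c then 0
      else if pvIdxR c rest = -1 then -1 else pvIdxR c rest + 1

theorem pvIdxR_ge (c : String) (es : List (List String)) : -1 ≤ pvIdxR c es := by
  induction es with
  | nil => simp [pvIdxR]
  | cons s rest ih => simp only [pvIdxR]; split_ifs <;> omega

theorem pvFindSetA_spec (c : String) (es : List (List String)) :
    pvFindSetA c es = [] ∨ (pvFindSetA c es).contains c = true := by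
  induction es with
  | nil => simp [pvFindSetA]
  | cons s rest ih =>
    simp only [pvFindSetA]
    split_ifs with h
    · exact Or.inr h
    · exact ih

-- crux: first-matching-set equality is first-index equality
theorem pvFind_eq_iff_idx_eq (c₁ c₂ : String) (es : List (List String)) :
    pvFindSetA c₁ es = pvFindSetA c₂ es ↔ pvIdxR c₁ es = pvIdxR c₂ es := by
  induction es with
  | nil => simp [pvFindSetA, pvIdxR]
  | cons s rest ih =>
    have key : ∀ a b : String, s.contains a = true → s.contains b = false →
        ¬ (s = pvFindSetA b rest) := by
      intro a b ha hb hEq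
      rcases pvFindSetA_spec b rest with h0 | hc
      · rw [h0] at hEq; subst hEq; simp at ha
      · rw [← hEq] at hc; rw [hc] at hb; cases hb
    simp only [pvFindSetA, pvIdxR]
    by_cases h1 : s.contains c₁ = true <;> by_cases h2 : s.contains c₂ = true
    · rw [if_pos h1, if_pos h2, if_pos h1, if_pos h2]; simp
    · -- c₁ in s, c₂ absent
      rw [if_pos h1, if_neg h2, if_pos h1, if_neg h2]
      constructor
      · intro h; exact absurd h (key c₁ c₂ h1 (by simpa using h2))
      · intro h
        have g2 := pvIdxR_ge c₂ rest
        split_ifs at h <;> omega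
    · -- c₁ absent, c₂ in s
      rw [if_neg h1, if_pos h2, if_neg h1, if_pos h2]
      constructor
      · intro h; exact absurd h.symm (key c₂ c₁ h2 (by simpa using h1))
      · intro h
        have g1 := pvIdxR_ge c₁ rest
        split_ifs at h <;> omega
    · -- both absent
      rw [if_neg h1, if_neg h2, if_neg h1, if_neg h2]
      constructor
      · intro h
        have := ih.mp h
        have g1 := pvIdxR_ge c₁ rest
        have g2 := pvIdxR_ge c₂ rest
        split_ifs <;> omega
      · intro h
        apply ih.mpr
        have g1 := pvIdxR_ge c₁ rest
        have g2 := pvIdxR_ge c₂ rest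
        split_ifs at h <;> omega

-- inner dictionary-build loop: contains and getD characterisations
theorem pvInner_contains (ws : List String) (i : Int) (d : PySem.Dict String Int) (c : String) :
    (ws.foldl (fun d w => if d.contains w then d else d.insert w i) d).contains c
      = (d.contains c || ws.contains c) := by
  induction ws generalizing d with
  | nil => simp
  | cons w ws ih =>
    simp only [List.foldl_cons, ih, List.contains_cons]
    by_cases hdw : d.contains w = true
    · simp only [hdw, if_true]
      by_cases hcw : c = w
      · subst hcw; simp [hdw]
      · have hbw : (c == w) = false := by simpa using hcw
        simp [hbw]
    · simp only [Bool.not_eq_true] at hdw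
      simp only [hdw, Bool.false_eq_true, if_false, PySem.Dict.contains_insert]
      by_cases hcw : c = w
      · subst hcw; simp
      · cases h : c == w <;> cases hd : d.contains c <;> simp [h, hd]

theorem pvInner_getD (ws : List String) (i : Int) (d : PySem.Dict String Int) (c : String) :
    (ws.foldl (fun d w => if d.contains w then d else d.insert w i) d).getD c (-1)
      = if d.contains c then d.getD c (-1) else if ws.contains c then i else -1 := by
  induction ws generalizing d with
  | nil =>
    by_cases h : d.contains c = true
    · simp [h]
    · simp only [Bool.not_eq_true] at h
      simp [h, PySem.Dict.getD_of_not_contains d (-1) h]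
  | cons w ws ih =>
    simp only [List.foldl_cons, ih, List.contains_cons]
    by_cases hdw : d.contains w = true
    · simp only [hdw, if_true]
      by_cases hcw : c = w
      · subst hcw; simp [hdw]
      · simp [hcw]
    · simp only [Bool.not_eq_true] at hdw
      simp only [hdw, Bool.false_eq_true, if_false, PySem.Dict.contains_insert,
        PySem.Dict.getD_insert]
      by_cases hcw : c = w
      · subst hcw; simp [hdw]
      · simp [hcw, beq_iff_eq]

-- outer loop over enumerate equalitySets
theorem pvBuild_getD_aux (c : String) (sets : List (List String)) :
    ∀ (n : Int) (d : PySem.Dict String Int),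
    ((PySem.List.enumerate sets n).foldl
        (fun d p => p.2.foldl (fun d w => if d.contains w then d else d.insert w p.1) d) d).getD c (-1)
      = if d.contains c then d.getD c (-1)
        else if pvIdxR c sets = -1 then -1 else n + pvIdxR c sets := by
  induction sets with
  | nil =>
    intro n d
    by_cases h : d.contains c = true
    · simp [PySem.List.enumerate, pvIdxR, h]
    · simp only [Bool.not_eq_true] at h
      simp [PySem.List.enumerate, pvIdxR, h, PySem.Dict.getD_of_not_contains d (-1) h]
  | cons s rest ih =>
    intro n d
    rw [PySem.List.enumerate_cons]
    simp only [List.foldl_cons, ih (n + 1)]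
    rw [pvInner_contains, pvInner_getD]
    simp only [pvIdxR]
    by_cases hdc : d.contains c = true
    · simp [hdc]
    · simp only [Bool.not_eq_true] at hdc
      by_cases hsc : s.contains c = true
      · have hsc' : c ∈ s := by simpa using hsc
        simp [hdc, hsc, hsc']
      · simp only [Bool.not_eq_true] at hsc
        have hsc' : c ∉ s := by simpa using hsc
        simp only [hdc, hsc, hsc', Bool.false_eq_true, if_false, Bool.false_or,
          decide_eq_true_eq, decide_eq_false hsc']
        have := pvIdxR_ge c rest
        split_ifs <;> omega

theorem pvBuild_getD (c : String) (es : List (List String)) :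
    (pvBuildIdx es).getD c (-1) = pvIdxR c es := by
  rw [pvBuildIdx, pvBuild_getD_aux c es 0 PySem.Dict.empty]
  have := pvIdxR_ge c es
  rw [if_neg (by simp)]
  split_ifs <;> omega

theorem pvSet_contains (ev : List String) (x : String) :
    (PySem.Set.ofList ev).contains x = ev.contains x := by
  rcases h : ev.contains x
  · simp only [List.contains_eq_mem, decide_eq_false_iff_not] at h ⊢
    simpa [PySem.Set.mem_ofList] using h
  · simp only [List.contains_eq_mem, decide_eq_true_eq] at h ⊢
    simpa [PySem.Set.mem_ofList] using h

theorem pvStep (es : List (List String)) (ev : List String) (c1 c2 : String)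
    (LA LB : Bool) (hL : LA = LB) :
    (if ev.contains c1 && ev.contains c2 then
       (if pvFindSetA c1 es == pvFindSetA c2 es then false else LA) else LA)
  = (if (PySem.Set.ofList ev).contains c1 && (PySem.Set.ofList ev).contains c2
        && ((pvBuildIdx es).getD c1 (-1) == (pvBuildIdx es).getD c2 (-1)) then false else LB) := by
  subst hL
  rw [pvSet_contains, pvSet_contains, pvBuild_getD, pvBuild_getD]
  have hfi : (pvFindSetA c1 es == pvFindSetA c2 es) = (pvIdxR c1 es == pvIdxR c2 es) := by
    rcases h : pvIdxR c1 es == pvIdxR c2 es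
    · simp only [beq_eq_false_iff_ne] at h ⊢
      exact fun hc => h ((pvFind_eq_iff_idx_eq c1 c2 es).mp hc)
    · simp only [beq_iff_eq] at h ⊢
      exact (pvFind_eq_iff_idx_eq c1 c2 es).mpr h
  rw [hfi]
  cases hm : ev.contains c1 && ev.contains c2 <;>
    cases hix : pvIdxR c1 es == pvIdxR c2 es <;> simp [hm, hix]

theorem pvLoop_eq (es : List (List String)) (ev : List String) (ip : List String)
    (hPre : ∀ p ∈ ip, 2 ≤ PySem.Str.len p) :
    pvLoopA es ev ip = pvLoopB (pvBuildIdx es) (PySem.Set.ofList ev) ip := by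
  induction ip with
  | nil => rfl
  | cons pair rest ih =>
    have h2 : 2 ≤ pair.toList.length := by
      have := hPre pair (List.mem_cons_self ..)
      simpa [PySem.Str.len_eq, PySem.Chars.len] using this
    have hrest : pvLoopA es ev rest = pvLoopB (pvBuildIdx es) (PySem.Set.ofList ev) rest :=
      ih (fun p hp => hPre p (List.mem_cons_of_mem _ hp))
    have h0 : PySem.Str.pyGet? pair 0 = pair.toList[(0 : Nat)]? := by
      exact_mod_cast PySem.Str.pyGet?_natCast pair 0
    have h1 : PySem.Str.pyGet? pair 1 = pair.toList[(1 : Nat)]? := by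
      exact_mod_cast PySem.Str.pyGet?_natCast pair 1
    rw [List.getElem?_eq_getElem (show (0 : Nat) < pair.toList.length by omega)] at h0
    rw [List.getElem?_eq_getElem (show (1 : Nat) < pair.toList.length by omega)] at h1
    simp only [pvLoopA, pvLoopB, h0, h1]
    exact pvStep es ev _ _ _ _ hrest

-- ===== VERDICT (by name: the statement is the Claim_ definition above) =====
theorem isConditionsValid_spec : Claim_equal_isConditionsValid := by
  intro es ip ev _ hPre
  unfold Spec_isConditionsValid isConditionsValid isConditionsValid_alt
  cases ip with
  | nil => rfl
  | cons p rest =>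
    rw [if_neg (by simp)]
    exact pvLoop_eq es ev (p :: rest) hPre
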